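-- pv_equiv track=rewrite | github.com/Zenidog8/Convex_Hull | geometriaComputacional.py | ordenarPuntos
-- ===== SOURCE A (Python) =====
-- def cmpAmayorB(a, b):
--     '''
--     Genera un criterio para comparar elementos
--     '''
--     if a[0] > b[0]:
--         return True
--
--     if a[0] < b[0]:
--         return False
--
--     else:
--         if a[1] >= b[1]:
--             return True
--         elif a[1] < b[1]:
--             return False
--
-- def ordenarPuntos(puntos):
--     '''
--     Ordenamiento basico para ordenar los puntos
--     '''
--     for i in range(len(puntos)):
--             for j in range(len(puntos)-1):
--                     if cmpAmayorB(puntos[j], puntos[j+1]):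
--                             tmp = puntos[j]
--                             puntos[j] = puntos[j+1]
--                             puntos[j+1] = tmp
--
--     return puntos
-- ===== SOURCE B (Python) =====
-- def ordenarPuntos(puntos):
--     '''
--     Ordena los puntos in place con el sort de la libreria estandar.
--     '''
--     puntos.sort(key=lambda p: (p[0], p[1]))
--     return puntos
-- ===== Notes on version B (the rewrite author's own statement) =====
-- stated objective: faster
-- what changed: Replaces the hand-written O(n^2) bubble sort (with its swap-on-equal comparator) by a single in-place call to the standard library's Timsort with the explicit lexicographic key (p[0], p[1]).
import Mathlib
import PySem

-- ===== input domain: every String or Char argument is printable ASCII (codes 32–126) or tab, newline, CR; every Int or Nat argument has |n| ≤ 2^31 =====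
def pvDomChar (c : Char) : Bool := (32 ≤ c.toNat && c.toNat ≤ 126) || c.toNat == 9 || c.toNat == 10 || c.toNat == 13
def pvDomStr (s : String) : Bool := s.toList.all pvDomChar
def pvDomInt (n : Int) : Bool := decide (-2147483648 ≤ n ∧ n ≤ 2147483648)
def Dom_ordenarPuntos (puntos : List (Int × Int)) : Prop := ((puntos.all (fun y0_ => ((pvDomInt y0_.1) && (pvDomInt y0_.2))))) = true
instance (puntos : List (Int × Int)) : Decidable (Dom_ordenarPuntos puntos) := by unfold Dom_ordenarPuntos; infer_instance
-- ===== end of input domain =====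

-- B replaces A's hand-written O(n^2) bubble sort by one in-place standard-library sort call with the
-- lexicographic key; both Pythons mutate the argument and return the same object, and the equivalence
-- proved here is about the returned value.

-- ===== PORT A =====
def cmpAmayorB (a b : Int × Int) : Bool :=
  if a.1 > b.1 then true else if a.1 < b.1 then false else if a.2 ≥ b.2 then true else false

-- one step of A's inner loop: compare puntos[j] and puntos[j+1], swap in place if needed
-- (both indices are always in range here, so pyGetD with a junk default is exact)
def pasoBurbuja (qs : List (Int × Int)) (j : Int) : List (Int × Int) :=
  if cmpAmayorB (PySem.List.pyGetD qs j (0, 0)) (PySem.List.pyGetD qs (j + 1) (0, 0)) then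
    (qs.set j.toNat (PySem.List.pyGetD qs (j + 1) (0, 0))).set (j.toNat + 1)
      (PySem.List.pyGetD qs j (0, 0))
  else qs

-- the inner 'for j in range(len(puntos)-1)' loop
def pasadaBurbuja (ps : List (Int × Int)) : List (Int × Int) :=
  (PySem.List.pyRange 0 (PySem.List.len ps - 1) 1).foldl pasoBurbuja ps

def ordenarPuntos (puntos : List (Int × Int)) : List (Int × Int) :=
  (PySem.List.pyRange 0 (PySem.List.len puntos) 1).foldl (fun ps _ => pasadaBurbuja ps) puntos

-- ===== PORT B =====
def ordenarPuntos_alt (puntos : List (Int × Int)) : List (Int × Int) :=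
  PySem.List.sorted2 puntos (fun p => p.1) (fun p => p.2) false

-- ===== PRECONDITION & SPEC =====
def Spec_ordenarPuntos (puntos : List (Int × Int)) (out : List (Int × Int)) : Prop := out = ordenarPuntos_alt puntos
instance (puntos : List (Int × Int)) (out : List (Int × Int)) : Decidable (Spec_ordenarPuntos puntos out) := by unfold Spec_ordenarPuntos; infer_instance

-- ===== CLAIM (what is proved, stated in full; the proofs are below) =====
def Claim_equal_ordenarPuntos : Prop := ∀ (puntos : List (Int × Int)), Dom_ordenarPuntos puntos → Spec_ordenarPuntos puntos (ordenarPuntos puntos)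

-- ===== LEMMAS AND PROOFS =====
theorem paso_cons_nat (x : Int × Int) (qs : List (Int × Int)) (k : Nat) :
    pasoBurbuja (x :: qs) ((k : Int) + 1) = x :: pasoBurbuja qs (k : Int) := by
  unfold pasoBurbuja
  have h1 : ((k : Int) + 1) = ((k + 1 : Nat) : Int) := by push_cast; ring
  have h2 : (((k + 1 : Nat) : Int) + 1) = ((k + 2 : Nat) : Int) := by push_cast; ring
  simp only [h1, h2, PySem.List.pyGetD_natCast, Int.toNat_natCast]
  simp [List.set_cons_succ]
  split <;> rfl
theorem range_foldl_cons (x : Int × Int) (qs : List (Int × Int)) (n : Nat) :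
    (List.range n).foldl (fun (r : List (Int × Int)) (k : Nat) => pasoBurbuja r ((k : Int) + 1)) (x :: qs) =
      x :: (List.range n).foldl (fun (r : List (Int × Int)) (k : Nat) => pasoBurbuja r (k : Int)) qs := by
  induction n generalizing x qs with
  | zero => simp
  | succ n ih => rw [List.range_succ, List.foldl_append, List.foldl_append, ih]
                 simp [paso_cons_nat]
def onePass : List (Int × Int) → List (Int × Int)
  | [] => []
  | [a] => [a]
  | a :: b :: t => if cmpAmayorB a b then b :: onePass (a :: t) else a :: onePass (b :: t)
theorem pass_core : ∀ ps : List (Int × Int),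
    (List.range (ps.length - 1)).foldl (fun (r : List (Int × Int)) (k : Nat) => pasoBurbuja r (k : Int)) ps = onePass ps := by
  intro ps
  induction ps using onePass.induct with
  | case1 => simp [onePass]
  | case2 a => simp [onePass]
  | case3 a b t hc ih =>
      have hlen : (a :: b :: t).length - 1 = t.length + 1 := by simp
      rw [hlen, List.range_succ_eq_map, List.foldl_cons, List.foldl_map]
      have h0 : pasoBurbuja (a :: b :: t) ((0 : Nat) : Int) = b :: a :: t := by
        simp [pasoBurbuja, PySem.List.pyGetD, hc]
      rw [h0]
      have hcast : (fun (r : List (Int × Int)) (k : Nat) => pasoBurbuja r ((k + 1 : Nat) : Int)) =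
          (fun (r : List (Int × Int)) (k : Nat) => pasoBurbuja r ((k : Int) + 1)) := by
        funext r k; norm_num
      rw [hcast, range_foldl_cons]
      simp only [List.length_cons, Nat.add_sub_cancel] at ih
      rw [ih]
      simp [onePass, hc]
  | case4 a b t hc ih =>
      have hlen : (a :: b :: t).length - 1 = t.length + 1 := by simp
      rw [hlen, List.range_succ_eq_map, List.foldl_cons, List.foldl_map]
      have h0 : pasoBurbuja (a :: b :: t) ((0 : Nat) : Int) = a :: b :: t := by
        simp [pasoBurbuja, PySem.List.pyGetD, hc]
      rw [h0]
      have hcast : (fun (r : List (Int × Int)) (k : Nat) => pasoBurbuja r ((k + 1 : Nat) : Int)) =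
          (fun (r : List (Int × Int)) (k : Nat) => pasoBurbuja r ((k : Int) + 1)) := by
        funext r k; norm_num
      rw [hcast, range_foldl_cons]
      simp only [List.length_cons, Nat.add_sub_cancel] at ih
      rw [ih]
      simp [onePass, hc]
def lexle (a b : Int × Int) : Prop := a.1 < b.1 ∨ (a.1 = b.1 ∧ a.2 ≤ b.2)
theorem cmp_true_iff (a b : Int × Int) : cmpAmayorB a b = true ↔ lexle b a := by
  unfold cmpAmayorB lexle; split_ifs <;> simp <;> omega
theorem lexle_trans {a b c : Int × Int} (h1 : lexle a b) (h2 : lexle b c) : lexle a c := by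
  unfold lexle at *; omega
theorem lexle_antisymm {a b : Int × Int} (h1 : lexle a b) (h2 : lexle b a) : a = b := by
  unfold lexle at *
  have : a.1 = b.1 ∧ a.2 = b.2 := by omega
  exact Prod.ext this.1 this.2

theorem pass_eq_onePass (ps : List (Int × Int)) : pasadaBurbuja ps = onePass ps := by
  unfold pasadaBurbuja
  rw [PySem.List.pyRange_one, List.foldl_map]
  have hn : ((PySem.List.len ps - 1) - 0).toNat = ps.length - 1 := by
    simp [PySem.List.len]
  rw [hn, ← pass_core ps]
  congr 1; funext r k; norm_num
theorem onePass_perm : ∀ l : List (Int × Int), (onePass l).Perm l := by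
  intro l
  induction l using onePass.induct with
  | case1 => simp [onePass]
  | case2 a => simp [onePass]
  | case3 a b t hc ih =>
      simp only [onePass, hc, if_pos]
      exact (ih.cons b).trans (List.Perm.swap a b t)
  | case4 a b t hc ih =>
      simp only [onePass, hc]
      simpa using ih.cons a
theorem onePass_append_max : ∀ (l : List (Int × Int)) (M : Int × Int),
    (∀ y ∈ l, lexle y M) → onePass (l ++ [M]) = onePass l ++ [M] := by
  intro l
  induction l using onePass.induct with
  | case1 => intro M h; simp [onePass]
  | case2 a =>
      intro M h
      simp only [List.cons_append, List.nil_append, onePass]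
      split
      · next hc =>
          have : a = M := lexle_antisymm (h a (by simp)) ((cmp_true_iff a M).mp hc)
          simp [this]
      · rfl
  | case3 a b t hc ih =>
      intro M h
      simp only [List.cons_append, onePass, hc, if_pos]
      rw [show a :: (t ++ [M]) = (a :: t) ++ [M] from rfl,
          ih M (fun y hy => h y (by simp at hy ⊢; tauto))]
  | case4 a b t hc ih =>
      intro M h
      simp only [List.cons_append, onePass, hc]
      rw [show b :: (t ++ [M]) = (b :: t) ++ [M] from rfl,
          ih M (fun y hy => h y (by simp at hy ⊢; tauto))]
      simp
theorem iterate_append_max (n : Nat) : ∀ (l : List (Int × Int)) (M : Int × Int),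
    (∀ y ∈ l, lexle y M) → onePass^[n] (l ++ [M]) = onePass^[n] l ++ [M] := by
  induction n with
  | zero => intro l M h; simp
  | succ n ih =>
      intro l M h
      rw [Function.iterate_succ_apply, Function.iterate_succ_apply,
          onePass_append_max l M h]
      exact ih _ M (fun y hy => h y ((onePass_perm l).mem_iff.mp hy))
theorem lexle_total (a b : Int × Int) : lexle a b ∨ lexle b a := by unfold lexle; omega
theorem cmp_false_lexle {a b : Int × Int} (hc : ¬ cmpAmayorB a b = true) : lexle a b := by
  rcases lexle_total a b with h | h
  · exact h
  · exact absurd ((cmp_true_iff a b).mpr h) hc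
theorem onePass_last_max : ∀ (t : List (Int × Int)) (x : Int × Int),
    ∃ r m, onePass (x :: t) = r ++ [m] ∧ ∀ y ∈ x :: t, lexle y m := by
  intro t
  induction t with
  | nil =>
      intro x
      refine ⟨[], x, by simp [onePass], ?_⟩
      intro y hy; simp at hy; subst hy; unfold lexle; omega
  | cons b t' ih =>
      intro x
      by_cases hc : cmpAmayorB x b = true
      · obtain ⟨r, m, hr, hm⟩ := ih x
        refine ⟨b :: r, m, by simp [onePass, hc, hr], ?_⟩
        intro y hy
        simp only [List.mem_cons] at hy
        rcases hy with rfl | rfl | h2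
        · exact hm y (by simp)
        · exact lexle_trans ((cmp_true_iff x y).mp hc) (hm x (by simp))
        · exact hm y (by simp [h2])
      · obtain ⟨r, m, hr, hm⟩ := ih b
        refine ⟨x :: r, m, by simp [onePass, hc, hr], ?_⟩
        intro y hy
        simp only [List.mem_cons] at hy
        rcases hy with rfl | rfl | h2
        · exact lexle_trans (cmp_false_lexle hc) (hm b (by simp))
        · exact hm y (by simp)
        · exact hm y (by simp [h2])
theorem iterate_perm (n : Nat) (l : List (Int × Int)) : (onePass^[n] l).Perm l := by
  induction n generalizing l with
  | zero => simp
  | succ n ih => rw [Function.iterate_succ_apply]; exact (ih _).trans (onePass_perm l)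
theorem sorted_iterate : ∀ (n : Nat) (l : List (Int × Int)), l.length ≤ n →
    List.Pairwise lexle (onePass^[n] l) := by
  intro n
  induction n with
  | zero =>
      intro l hl
      have : l = [] := List.eq_nil_of_length_eq_zero (Nat.le_zero.mp hl)
      simp [this]
  | succ n ih =>
      intro l hl
      cases l with
      | nil =>
          have h0 : onePass^[n+1] ([] : List (Int × Int)) = onePass^[n] [] := by
            rw [Function.iterate_succ_apply]; congr 1; simp [onePass]
          rw [h0]; exact ih [] (by simp)
      | cons x t =>
          rw [Function.iterate_succ_apply]
          obtain ⟨r, m, hr, hm⟩ := onePass_last_max t x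
          rw [hr]
          have hrlen : r.length = t.length := by
            have := (onePass_perm (x :: t)).length_eq
            rw [hr] at this; simp at this ⊢; omega
          have hrmem : ∀ y ∈ r, lexle y m := by
            intro y hy
            exact hm y ((onePass_perm (x :: t)).mem_iff.mp (by rw [hr]; simp [hy]))
          rw [iterate_append_max n r m hrmem]
          rw [List.pairwise_append]
          refine ⟨ih r (by simp at hl; omega), by simp, ?_⟩
          intro y hy m' hm'
          simp at hm'; subst hm'
          exact hrmem y ((iterate_perm n r).mem_iff.mp hy)
theorem foldl_const_iterate {α β : Type} (f : α → α) (l : List β) (x : α) :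
    l.foldl (fun a _ => f a) x = f^[l.length] x := by
  induction l generalizing x with
  | nil => rfl
  | cons b t ih => simp [List.foldl_cons, ih, Function.iterate_succ_apply]

theorem ordenar_eq_iterate (l : List (Int × Int)) :
    ordenarPuntos l = onePass^[l.length] l := by
  unfold ordenarPuntos
  have hf : (fun (ps : List (Int × Int)) (_ : Int) => pasadaBurbuja ps) =
      (fun (ps : List (Int × Int)) (_ : Int) => onePass ps) := by
    funext ps j; exact pass_eq_onePass ps
  rw [hf, foldl_const_iterate onePass _ l]
  congr 1
  rw [PySem.List.length_pyRange_one]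
  simp [PySem.List.len]

theorem lt2_true_lexle {a b : Int × Int}
    (h : (decide (a.1 < b.1) || (!decide (b.1 < a.1) && decide (a.2 < b.2))) = true) :
    lexle a b := by
  simp at h; unfold lexle; omega
theorem lt2_false_lexle {a b : Int × Int}
    (h : (decide (a.1 < b.1) || (!decide (b.1 < a.1) && decide (a.2 < b.2))) = false) :
    lexle b a := by
  simp at h; unfold lexle; omega
theorem insertBy_pairwise (x : Int × Int) : ∀ acc : List (Int × Int),
    List.Pairwise lexle acc →
    List.Pairwise lexle (PySem.List.insertBy
      (fun a b => decide (a.1 < b.1) || (!decide (b.1 < a.1) && decide (a.2 < b.2))) x acc) := by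
  intro acc
  induction acc with
  | nil => intro _; simp [PySem.List.insertBy]
  | cons y ys ih =>
      intro hp
      rw [List.pairwise_cons] at hp
      show List.Pairwise lexle (if _ = true then _ else _)
      split
      · next hlt =>
          rw [List.pairwise_cons]
          refine ⟨?_, List.Pairwise.cons hp.1 hp.2⟩
          intro z hz
          rcases List.mem_cons.mp hz with rfl | hz'
          · exact lt2_true_lexle hlt
          · exact lexle_trans (lt2_true_lexle hlt) (hp.1 z hz')
      · next hlt =>
          rw [List.pairwise_cons]
          refine ⟨?_, ih hp.2⟩
          intro z hz
          rcases (PySem.List.mem_insertBy _ x z ys).mp hz with rfl | hz'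
          · exact lt2_false_lexle (by simpa using hlt)
          · exact hp.1 z hz'
theorem foldl_insertBy_pairwise : ∀ (l acc : List (Int × Int)), List.Pairwise lexle acc →
    List.Pairwise lexle (List.foldl (fun acc x => PySem.List.insertBy
      (fun a b => decide (a.1 < b.1) || (!decide (b.1 < a.1) && decide (a.2 < b.2))) x acc) acc l) := by
  intro l
  induction l with
  | nil => intro acc h; exact h
  | cons x t ih => intro acc h; exact ih _ (insertBy_pairwise x acc h)
theorem alt_pairwise (l : List (Int × Int)) : List.Pairwise lexle (ordenarPuntos_alt l) := by
  exact foldl_insertBy_pairwise l [] (by simp)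

-- ===== VERDICT (by name: the statement is the Claim_ definition above) =====
theorem ordenarPuntos_spec : Claim_equal_ordenarPuntos := by
  intro l _hdom
  unfold Spec_ordenarPuntos
  have hperm : (ordenarPuntos l).Perm (ordenarPuntos_alt l) := by
    rw [ordenar_eq_iterate]
    exact (iterate_perm _ _).trans (PySem.List.sorted2_perm l _ _ false).symm
  have hA : List.Pairwise lexle (ordenarPuntos l) := by
    rw [ordenar_eq_iterate]; exact sorted_iterate _ _ le_rfl
  exact List.Perm.eq_of_pairwise (fun a b _ _ h1 h2 => lexle_antisymm h1 h2) hA (alt_pairwise l) hperm
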